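-- pv_equiv track=rewrite | github.com/justinmvail/glossy | font_scraper/stroke_routes_compare.py | _pick_epochs
-- ===== SOURCE A (Python) =====
-- def _pick_epochs(available: dict, targets: list) -> list:
--     if not available:
--         return []
--     avail_sorted = sorted(available.keys())
--     picked = []
--     seen = set()
--     for t in targets:
--         closest = min(avail_sorted, key=lambda x: abs(x - t))
--         if closest not in seen and abs(closest - t) <= 5:
--             picked.append(closest)
--             seen.add(closest)
--     return picked
-- ===== SOURCE B (Python) =====
-- def _pick_epochs(available: dict, targets: list) -> list:
--     keys = set(available)
--     picked = []
--     seen = set()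
--     for t in targets:
--         for c in (t, t - 1, t + 1, t - 2, t + 2, t - 3, t + 3, t - 4, t + 4, t - 5, t + 5):
--             if c in keys:
--                 if c not in seen:
--                     picked.append(c)
--                     seen.add(c)
--                 break
--     return picked
-- ===== Notes on version B (the rewrite author's own statement) =====
-- stated objective: faster
-- what changed: Instead of sorting the keys and scanning all of them with min(key=|x-t|) for every target, B builds a hash set of the keys once and, per target t, probes only the 11 candidate values t, t-1, t+1, ..., t-5, t+5 (the fixed threshold is 5), taking the first present one, which is exactly the closest key with the smaller-on-ties rule.
import Mathlib
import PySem

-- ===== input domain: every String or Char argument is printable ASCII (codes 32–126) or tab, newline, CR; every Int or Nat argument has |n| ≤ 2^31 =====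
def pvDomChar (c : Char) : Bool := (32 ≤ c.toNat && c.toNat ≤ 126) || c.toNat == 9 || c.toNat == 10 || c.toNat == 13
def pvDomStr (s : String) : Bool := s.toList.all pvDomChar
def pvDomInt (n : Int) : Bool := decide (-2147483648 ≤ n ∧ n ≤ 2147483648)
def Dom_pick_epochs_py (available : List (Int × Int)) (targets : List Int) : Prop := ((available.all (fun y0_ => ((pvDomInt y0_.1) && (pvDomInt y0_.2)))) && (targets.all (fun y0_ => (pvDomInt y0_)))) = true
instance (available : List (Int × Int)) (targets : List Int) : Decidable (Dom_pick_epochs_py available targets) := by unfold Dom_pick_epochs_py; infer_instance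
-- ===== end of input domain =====

-- B replaces A's per-target scan of all sorted keys by at most 11 hash-set membership probes
-- (the candidates t, t-1, t+1, …, t-5, t+5 for the fixed threshold 5), dropping the sort entirely.

-- ===== PORT A =====
-- A's per-target loop body (closest = min(avail_sorted, key=|x-t|); append if new and within 5)
def pick_step_a (avail_sorted : List Int) (st : List Int × PySem.Set Int) (t : Int) :
    List Int × PySem.Set Int :=
  match PySem.List.min? avail_sorted (fun x => |x - t|) with
  | none => st
  | some closest =>
    if !(PySem.Set.contains st.2 closest) && decide (|closest - t| ≤ 5) then
      (st.1 ++ [closest], PySem.Set.add st.2 closest)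
    else st

def pick_epochs_py (available : List (Int × Int)) (targets : List Int) : List Int :=
  if available = [] then []
  else
    let avail_sorted := PySem.List.sorted (PySem.List.dedup (available.map Prod.fst)) (fun x => x) false
    (List.foldl (pick_step_a avail_sorted) ([], PySem.Set.empty) targets).1

-- ===== PORT B =====
-- the tuple of candidate values B probes for target t (distance 0,1,…,5; smaller value first)
def pvCands (t : Int) : List Int :=
  [t, t - 1, t + 1, t - 2, t + 2, t - 3, t + 3, t - 4, t + 4, t - 5, t + 5]

-- B's per-target loop body (first candidate present in the key set; append if new)
def pick_step_b (keys : PySem.Set Int) (st : List Int × PySem.Set Int) (t : Int) :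
    List Int × PySem.Set Int :=
  match (pvCands t).find? (fun c => PySem.Set.contains keys c) with
  | none => st
  | some c =>
    if PySem.Set.contains st.2 c then st
    else (st.1 ++ [c], PySem.Set.add st.2 c)

def pick_epochs_py_alt (available : List (Int × Int)) (targets : List Int) : List Int :=
  let keys := PySem.Set.ofList (available.map Prod.fst)
  (List.foldl (pick_step_b keys) ([], PySem.Set.empty) targets).1

-- ===== PRECONDITION & SPEC =====
def Spec_pick_epochs_py (available : List (Int × Int)) (targets : List Int) (out : List Int) : Prop := out = pick_epochs_py_alt available targets
instance (available : List (Int × Int)) (targets : List Int) (out : List Int) : Decidable (Spec_pick_epochs_py available targets out) := by unfold Spec_pick_epochs_py; infer_instance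

-- ===== CLAIM (what is proved, stated in full; the proofs are below) =====
def Claim_equal_pick_epochs_py : Prop := ∀ (available : List (Int × Int)) (targets : List Int), Dom_pick_epochs_py available targets → Spec_pick_epochs_py available targets (pick_epochs_py available targets)

-- ===== LEMMAS AND PROOFS =====

-- membership in the candidate list is exactly "within distance 5 of t"
lemma pvMem_cands (t m : Int) : m ∈ pvCands t ↔ |m - t| ≤ 5 := by
  simp only [pvCands, List.mem_cons, List.not_mem_nil, or_false, Int.abs_eq_natAbs]
  omega

-- the fold step inside PySem.List.min?, named so the invariant below can be applied
def pvMinStep (key : Int → Int) (acc : Option Int) (x : Int) : Option Int :=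
  match acc with | none => some x | some p => if key x < key p then some x else some p

lemma pvMin?_eq_foldl (key : Int → Int) (S : List Int) :
    PySem.List.min? S key = List.foldl (pvMinStep key) none S := by
  unfold PySem.List.min?
  congr 1
  funext acc x
  cases acc <;> rfl

-- invariant of that fold: the running result is the FIRST strict minimum
lemma pvMinInv (key : Int → Int) (S : List Int) :
    ∀ (b m : Int), List.foldl (pvMinStep key) (some b) S = some m →
      (m = b ∧ ∀ a ∈ S, key b ≤ key a) ∨
      (∃ l₁ l₂, S = l₁ ++ m :: l₂ ∧ key m < key b ∧
        (∀ a ∈ l₁, key m < key a) ∧ (∀ a ∈ l₂, key m ≤ key a)) := by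
  induction S with
  | nil =>
    intro b m h
    simp only [List.foldl_nil, Option.some.injEq] at h
    exact Or.inl ⟨h.symm, by simp⟩
  | cons a S ih =>
    intro b m h
    rw [List.foldl_cons] at h
    rw [show pvMinStep key (some b) a = if key a < key b then some a else some b from rfl] at h
    by_cases hab : key a < key b
    · rw [if_pos hab] at h
      rcases ih a m h with ⟨rfl, hall⟩ | ⟨l₁, l₂, hS, hlt, h1, h2⟩
      · exact Or.inr ⟨[], S, rfl, hab, by simp, hall⟩
      · exact Or.inr ⟨a :: l₁, l₂, by rw [hS]; rfl, lt_trans hlt hab,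
          by intro x hx; rcases List.mem_cons.mp hx with rfl | hx; exact hlt; exact h1 x hx, h2⟩
    · rw [if_neg hab] at h
      push Not at hab
      rcases ih b m h with ⟨rfl, hall⟩ | ⟨l₁, l₂, hS, hlt, h1, h2⟩
      · exact Or.inl ⟨rfl, by
          intro x hx; rcases List.mem_cons.mp hx with rfl | hx
          · exact hab
          · exact hall x hx⟩
      · exact Or.inr ⟨a :: l₁, l₂, by rw [hS]; rfl, hlt,
          by intro x hx; rcases List.mem_cons.mp hx with rfl | hx
             · exact lt_of_lt_of_le hlt hab
             · exact h1 x hx, h2⟩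

-- tie-break: on a strictly increasing list Python's min (first extremal) returns the smaller tied key
lemma pvMinFirst (key : Int → Int) (S : List Int) (hs : S.Pairwise (· < ·)) (m y : Int)
    (h : PySem.List.min? S key = some m) (hy : y ∈ S) (hk : key y = key m) : m ≤ y := by
  cases S with
  | nil => simp at hy
  | cons x S' =>
    rw [pvMin?_eq_foldl, List.foldl_cons,
      show pvMinStep key none x = some x from rfl] at h
    rcases pvMinInv key S' x m h with ⟨rfl, _⟩ | ⟨l₁, l₂, hS, hltx, h1, h2⟩
    · rcases List.mem_cons.mp hy with rfl | hy'
      · exact le_refl _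
      · exact le_of_lt ((List.pairwise_cons.mp hs).1 y hy')
    · subst hS
      rcases List.mem_cons.mp hy with rfl | hy'
      · exact absurd (hk ▸ hltx) (lt_irrefl _)
      · rcases List.mem_append.mp hy' with h3 | h4
        · exact absurd hk (ne_of_gt (h1 y h3))
        · rcases List.mem_cons.mp h4 with rfl | h5
          · exact le_refl _
          · have hp : (m :: l₂).Pairwise (· < ·) :=
              List.Pairwise.sublist ((List.sublist_append_right l₁ (m :: l₂)).cons x) hs
            exact le_of_lt (List.rel_of_pairwise_cons hp h5)

-- the B-side membership predicate is plain list membership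
lemma pvContains_ofList (K : List Int) (x : Int) :
    PySem.Set.contains (PySem.Set.ofList K) x = decide (x ∈ K) := by
  simp [PySem.Set.contains, PySem.Set.mem_ofList]

-- a successful candidate probe returns the unique "closest to t, smaller on ties" element of K
lemma pvCands_found (K : List Int) (t c : Int)
    (h : (pvCands t).find? (fun x => PySem.Set.contains (PySem.Set.ofList K) x) = some c) :
    c ∈ K ∧ |c - t| ≤ 5 ∧ ∀ y ∈ K, |c - t| < |y - t| ∨ (|c - t| = |y - t| ∧ c ≤ y) := by
  rw [show (fun x => PySem.Set.contains (PySem.Set.ofList K) x) = (fun x => decide (x ∈ K))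
    from funext fun x => pvContains_ofList K x] at h
  simp only [pvCands] at h
  by_cases h0 : t ∈ K
  · rw [List.find?_cons_of_pos (by simpa using h0)] at h
    simp only [Option.some.injEq] at h
    subst h
    refine ⟨h0, by simp only [Int.abs_eq_natAbs]; omega, ?_⟩
    intro y hy
    simp only [Int.abs_eq_natAbs]
    omega
  · rw [List.find?_cons_of_neg (by simpa using h0)] at h
    by_cases h1 : t - 1 ∈ K
    · rw [List.find?_cons_of_pos (by simpa using h1)] at h
      simp only [Option.some.injEq] at h
      subst h
      refine ⟨h1, by simp only [Int.abs_eq_natAbs]; omega, ?_⟩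
      intro y hy
      have n0 : y ≠ t := fun e => h0 (e ▸ hy)
      simp only [Int.abs_eq_natAbs]
      omega
    · rw [List.find?_cons_of_neg (by simpa using h1)] at h
      by_cases h2 : t + 1 ∈ K
      · rw [List.find?_cons_of_pos (by simpa using h2)] at h
        simp only [Option.some.injEq] at h
        subst h
        refine ⟨h2, by simp only [Int.abs_eq_natAbs]; omega, ?_⟩
        intro y hy
        have n0 : y ≠ t := fun e => h0 (e ▸ hy)
        have n1 : y ≠ t - 1 := fun e => h1 (e ▸ hy)
        simp only [Int.abs_eq_natAbs]
        omega
      · rw [List.find?_cons_of_neg (by simpa using h2)] at h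
        by_cases h3 : t - 2 ∈ K
        · rw [List.find?_cons_of_pos (by simpa using h3)] at h
          simp only [Option.some.injEq] at h
          subst h
          refine ⟨h3, by simp only [Int.abs_eq_natAbs]; omega, ?_⟩
          intro y hy
          have n0 : y ≠ t := fun e => h0 (e ▸ hy)
          have n1 : y ≠ t - 1 := fun e => h1 (e ▸ hy)
          have n2 : y ≠ t + 1 := fun e => h2 (e ▸ hy)
          simp only [Int.abs_eq_natAbs]
          omega
        · rw [List.find?_cons_of_neg (by simpa using h3)] at h
          by_cases h4 : t + 2 ∈ K
          · rw [List.find?_cons_of_pos (by simpa using h4)] at h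
            simp only [Option.some.injEq] at h
            subst h
            refine ⟨h4, by simp only [Int.abs_eq_natAbs]; omega, ?_⟩
            intro y hy
            have n0 : y ≠ t := fun e => h0 (e ▸ hy)
            have n1 : y ≠ t - 1 := fun e => h1 (e ▸ hy)
            have n2 : y ≠ t + 1 := fun e => h2 (e ▸ hy)
            have n3 : y ≠ t - 2 := fun e => h3 (e ▸ hy)
            simp only [Int.abs_eq_natAbs]
            omega
          · rw [List.find?_cons_of_neg (by simpa using h4)] at h
            by_cases h5 : t - 3 ∈ K
            · rw [List.find?_cons_of_pos (by simpa using h5)] at h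
              simp only [Option.some.injEq] at h
              subst h
              refine ⟨h5, by simp only [Int.abs_eq_natAbs]; omega, ?_⟩
              intro y hy
              have n0 : y ≠ t := fun e => h0 (e ▸ hy)
              have n1 : y ≠ t - 1 := fun e => h1 (e ▸ hy)
              have n2 : y ≠ t + 1 := fun e => h2 (e ▸ hy)
              have n3 : y ≠ t - 2 := fun e => h3 (e ▸ hy)
              have n4 : y ≠ t + 2 := fun e => h4 (e ▸ hy)
              simp only [Int.abs_eq_natAbs]
              omega
            · rw [List.find?_cons_of_neg (by simpa using h5)] at h
              by_cases h6 : t + 3 ∈ K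
              · rw [List.find?_cons_of_pos (by simpa using h6)] at h
                simp only [Option.some.injEq] at h
                subst h
                refine ⟨h6, by simp only [Int.abs_eq_natAbs]; omega, ?_⟩
                intro y hy
                have n0 : y ≠ t := fun e => h0 (e ▸ hy)
                have n1 : y ≠ t - 1 := fun e => h1 (e ▸ hy)
                have n2 : y ≠ t + 1 := fun e => h2 (e ▸ hy)
                have n3 : y ≠ t - 2 := fun e => h3 (e ▸ hy)
                have n4 : y ≠ t + 2 := fun e => h4 (e ▸ hy)
                have n5 : y ≠ t - 3 := fun e => h5 (e ▸ hy)
                simp only [Int.abs_eq_natAbs]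
                omega
              · rw [List.find?_cons_of_neg (by simpa using h6)] at h
                by_cases h7 : t - 4 ∈ K
                · rw [List.find?_cons_of_pos (by simpa using h7)] at h
                  simp only [Option.some.injEq] at h
                  subst h
                  refine ⟨h7, by simp only [Int.abs_eq_natAbs]; omega, ?_⟩
                  intro y hy
                  have n0 : y ≠ t := fun e => h0 (e ▸ hy)
                  have n1 : y ≠ t - 1 := fun e => h1 (e ▸ hy)
                  have n2 : y ≠ t + 1 := fun e => h2 (e ▸ hy)
                  have n3 : y ≠ t - 2 := fun e => h3 (e ▸ hy)
                  have n4 : y ≠ t + 2 := fun e => h4 (e ▸ hy)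
                  have n5 : y ≠ t - 3 := fun e => h5 (e ▸ hy)
                  have n6 : y ≠ t + 3 := fun e => h6 (e ▸ hy)
                  simp only [Int.abs_eq_natAbs]
                  omega
                · rw [List.find?_cons_of_neg (by simpa using h7)] at h
                  by_cases h8 : t + 4 ∈ K
                  · rw [List.find?_cons_of_pos (by simpa using h8)] at h
                    simp only [Option.some.injEq] at h
                    subst h
                    refine ⟨h8, by simp only [Int.abs_eq_natAbs]; omega, ?_⟩
                    intro y hy
                    have n0 : y ≠ t := fun e => h0 (e ▸ hy)
                    have n1 : y ≠ t - 1 := fun e => h1 (e ▸ hy)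
                    have n2 : y ≠ t + 1 := fun e => h2 (e ▸ hy)
                    have n3 : y ≠ t - 2 := fun e => h3 (e ▸ hy)
                    have n4 : y ≠ t + 2 := fun e => h4 (e ▸ hy)
                    have n5 : y ≠ t - 3 := fun e => h5 (e ▸ hy)
                    have n6 : y ≠ t + 3 := fun e => h6 (e ▸ hy)
                    have n7 : y ≠ t - 4 := fun e => h7 (e ▸ hy)
                    simp only [Int.abs_eq_natAbs]
                    omega
                  · rw [List.find?_cons_of_neg (by simpa using h8)] at h
                    by_cases h9 : t - 5 ∈ K
                    · rw [List.find?_cons_of_pos (by simpa using h9)] at h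
                      simp only [Option.some.injEq] at h
                      subst h
                      refine ⟨h9, by simp only [Int.abs_eq_natAbs]; omega, ?_⟩
                      intro y hy
                      have n0 : y ≠ t := fun e => h0 (e ▸ hy)
                      have n1 : y ≠ t - 1 := fun e => h1 (e ▸ hy)
                      have n2 : y ≠ t + 1 := fun e => h2 (e ▸ hy)
                      have n3 : y ≠ t - 2 := fun e => h3 (e ▸ hy)
                      have n4 : y ≠ t + 2 := fun e => h4 (e ▸ hy)
                      have n5 : y ≠ t - 3 := fun e => h5 (e ▸ hy)
                      have n6 : y ≠ t + 3 := fun e => h6 (e ▸ hy)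
                      have n7 : y ≠ t - 4 := fun e => h7 (e ▸ hy)
                      have n8 : y ≠ t + 4 := fun e => h8 (e ▸ hy)
                      simp only [Int.abs_eq_natAbs]
                      omega
                    · rw [List.find?_cons_of_neg (by simpa using h9)] at h
                      by_cases h10 : t + 5 ∈ K
                      · rw [List.find?_cons_of_pos (by simpa using h10)] at h
                        simp only [Option.some.injEq] at h
                        subst h
                        refine ⟨h10, by simp only [Int.abs_eq_natAbs]; omega, ?_⟩
                        intro y hy
                        have n0 : y ≠ t := fun e => h0 (e ▸ hy)
                        have n1 : y ≠ t - 1 := fun e => h1 (e ▸ hy)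
                        have n2 : y ≠ t + 1 := fun e => h2 (e ▸ hy)
                        have n3 : y ≠ t - 2 := fun e => h3 (e ▸ hy)
                        have n4 : y ≠ t + 2 := fun e => h4 (e ▸ hy)
                        have n5 : y ≠ t - 3 := fun e => h5 (e ▸ hy)
                        have n6 : y ≠ t + 3 := fun e => h6 (e ▸ hy)
                        have n7 : y ≠ t - 4 := fun e => h7 (e ▸ hy)
                        have n8 : y ≠ t + 4 := fun e => h8 (e ▸ hy)
                        have n9 : y ≠ t - 5 := fun e => h9 (e ▸ hy)
                        simp only [Int.abs_eq_natAbs]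
                        omega
                      · rw [List.find?_cons_of_neg (by simpa using h10)] at h
                        simp at h

-- the single-target steps of A and B agree when the key list is nonempty
lemma pvStep_eq (K : List Int) (hK : K ≠ []) (st : List Int × PySem.Set Int) (t : Int) :
    pick_step_a (PySem.List.sorted (PySem.List.dedup K) (fun x => x) false) st t
      = pick_step_b (PySem.Set.ofList K) st t := by
  have hKmem : ∀ x, x ∈ PySem.List.sorted (PySem.List.dedup K) (fun x => x) false ↔ x ∈ K := by
    intro x
    rw [PySem.List.mem_sorted, PySem.List.dedup_eq_ofList, PySem.Set.mem_ofList]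
  have hSne : PySem.List.sorted (PySem.List.dedup K) (fun x => x) false ≠ [] := by
    intro hnil
    rcases List.exists_mem_of_ne_nil K hK with ⟨a, ha⟩
    have : a ∈ PySem.List.sorted (PySem.List.dedup K) (fun x => x) false := (hKmem a).mpr ha
    rw [hnil] at this
    simp at this
  have hsort : (PySem.List.sorted (PySem.List.dedup K) (fun x => x) false).Pairwise (· < ·) := by
    rw [PySem.List.dedup_eq_ofList]
    exact PySem.List.sorted_ofList_pairwise_lt K
  obtain ⟨m, hm⟩ : ∃ m, PySem.List.min? (PySem.List.sorted (PySem.List.dedup K) (fun x => x) false)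
      (fun x => |x - t|) = some m := by
    cases hmin : PySem.List.min? (PySem.List.sorted (PySem.List.dedup K) (fun x => x) false)
        (fun x => |x - t|) with
    | none => exact absurd ((PySem.List.min?_eq_none_iff _ _).mp hmin) hSne
    | some m => exact ⟨m, rfl⟩
  have hmK : m ∈ K := (hKmem m).mp (PySem.List.min?_mem hm)
  have hQm : ∀ y ∈ K, |m - t| ≤ |y - t| := fun y hy =>
    PySem.List.min?_isMin hm y ((hKmem y).mpr hy)
  unfold pick_step_a pick_step_b
  rw [hm]
  cases hf : (pvCands t).find? (fun c => PySem.Set.contains (PySem.Set.ofList K) c) with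
  | none =>
    have hall := List.find?_eq_none.mp hf
    have hnot : ¬ (|m - t| ≤ 5) := by
      intro hle
      have hmc := hall m ((pvMem_cands t m).mpr hle)
      rw [pvContains_ofList] at hmc
      simp [hmK] at hmc
    simp [hnot]
  | some c =>
    obtain ⟨hcK, hc5, hQc⟩ := pvCands_found K t c hf
    have hcm : c = m := by
      have h1 := hQm c hcK
      rcases hQc m hmK with h3 | ⟨h3, h4⟩
      · simp only [Int.abs_eq_natAbs] at h1 h3; omega
      · exact le_antisymm h4 (pvMinFirst _ _ hsort m c hm ((hKmem c).mpr hcK) h3)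
    subst hcm
    dsimp only
    rw [show decide (|c - t| ≤ 5) = true from by simp [hc5], Bool.and_true]
    cases hcont : PySem.Set.contains st.2 c <;> simp

-- a fold whose step fixes the state is the identity
lemma pvFoldl_id {α β : Type} (f : α → β → α) (hf : ∀ st t, f st t = st) :
    ∀ (l : List β) (init : α), List.foldl f init l = init := by
  intro l
  induction l with
  | nil => intro init; rfl
  | cons a l ih => intro init; rw [List.foldl_cons, hf]; exact ih init

-- ===== VERDICT (by name: the statement is the Claim_ definition above) =====
theorem pick_epochs_py_spec : Claim_equal_pick_epochs_py := by
  intro available targets _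
  unfold Spec_pick_epochs_py
  by_cases ha : available = []
  · subst ha
    show pick_epochs_py [] targets = pick_epochs_py_alt [] targets
    rw [pick_epochs_py, pick_epochs_py_alt, if_pos rfl]
    have hstep : ∀ (st : List Int × PySem.Set Int) (t : Int),
        pick_step_b (PySem.Set.ofList (([] : List (Int × Int)).map Prod.fst)) st t = st := by
      intro st t
      unfold pick_step_b
      rw [List.find?_eq_none.mpr]
      intro x _
      rw [pvContains_ofList]
      simp
    rw [pvFoldl_id _ hstep]
  · simp only [pick_epochs_py, pick_epochs_py_alt, if_neg ha]
    have hK : available.map Prod.fst ≠ [] := by simpa using ha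
    rw [show pick_step_a (PySem.List.sorted (PySem.List.dedup (available.map Prod.fst))
          (fun x => x) false) = pick_step_b (PySem.Set.ofList (available.map Prod.fst))
        from funext fun st => funext fun t => pvStep_eq (available.map Prod.fst) hK st t]
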